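-- pv_equiv track=rewrite | github.com/taurinrobinson-wq/saoriverse-console | emotional_os/glyphs/emotional_tag_matcher.py | _get_response_type
-- ===== SOURCE A (Python) =====
-- from typing import List, Dict, Optional
--
-- def _get_response_type(emotional_tags: List[str]) -> str:
--     """Determine response strategy based on emotional tags"""
--     if any('grief' in tag.lower() or 'loss' in tag.lower() for tag in emotional_tags):
--         return 'Witness'
--     elif any('joy' in tag.lower() for tag in emotional_tags):
--         return 'Soothe'
--     elif any('confusion' in tag.lower() for tag in emotional_tags):
--         return 'Guide'
--     else:
--         return 'Contain'
-- ===== SOURCE B (Python) =====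
-- def _get_response_type(emotional_tags):
--     """Determine response strategy based on emotional tags"""
--     witness = soothe = guide = False
--     for tag in emotional_tags:
--         t = tag.lower()
--         witness = witness or 'grief' in t or 'loss' in t
--         soothe = soothe or 'joy' in t
--         guide = guide or 'confusion' in t
--     if witness:
--         return 'Witness'
--     if soothe:
--         return 'Soothe'
--     if guide:
--         return 'Guide'
--     return 'Contain'
-- ===== Notes on version B (the rewrite author's own statement) =====
-- stated objective: faster
-- what changed: Replaces four separate short-circuiting any() scans over the tag list with a single pass that lowercases each tag once and accumulates three boolean flags, followed by a priority decision on the flags.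
import Mathlib
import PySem

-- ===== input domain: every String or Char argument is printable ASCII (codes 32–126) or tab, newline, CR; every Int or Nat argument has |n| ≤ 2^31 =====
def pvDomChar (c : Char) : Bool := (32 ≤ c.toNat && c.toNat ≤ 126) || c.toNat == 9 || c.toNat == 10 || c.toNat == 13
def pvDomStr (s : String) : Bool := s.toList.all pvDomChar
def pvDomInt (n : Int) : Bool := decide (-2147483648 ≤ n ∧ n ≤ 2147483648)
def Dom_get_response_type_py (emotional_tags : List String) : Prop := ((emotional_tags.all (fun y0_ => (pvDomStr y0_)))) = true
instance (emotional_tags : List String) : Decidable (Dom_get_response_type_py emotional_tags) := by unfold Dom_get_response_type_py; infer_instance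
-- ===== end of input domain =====

-- ===== PORT A =====
-- Port of A: four short-circuiting any() scans, in order.
def get_response_type_py (emotional_tags : List String) : String :=
  if emotional_tags.any (fun tag => PySem.Str.isIn "grief" (PySem.Str.lower tag) || PySem.Str.isIn "loss" (PySem.Str.lower tag)) then
    "Witness"
  else if emotional_tags.any (fun tag => PySem.Str.isIn "joy" (PySem.Str.lower tag)) then
    "Soothe"
  else if emotional_tags.any (fun tag => PySem.Str.isIn "confusion" (PySem.Str.lower tag)) then
    "Guide"
  else
    "Contain"

-- ===== PORT B =====
-- Port of B: one pass accumulating three flags, then a priority decision.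
def get_response_type_py_alt (emotional_tags : List String) : String :=
  let flags := emotional_tags.foldl
    (fun (acc : Bool × Bool × Bool) tag =>
      let t := PySem.Str.lower tag
      (acc.1 || PySem.Str.isIn "grief" t || PySem.Str.isIn "loss" t,
       acc.2.1 || PySem.Str.isIn "joy" t,
       acc.2.2 || PySem.Str.isIn "confusion" t))
    (false, false, false)
  if flags.1 then "Witness"
  else if flags.2.1 then "Soothe"
  else if flags.2.2 then "Guide"
  else "Contain"

-- ===== PRECONDITION & SPEC =====
def Spec_get_response_type_py (emotional_tags : List String) (out : String) : Prop := out = get_response_type_py_alt emotional_tags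
instance (emotional_tags : List String) (out : String) : Decidable (Spec_get_response_type_py emotional_tags out) := by unfold Spec_get_response_type_py; infer_instance

-- ===== CLAIM (what is proved, stated in full; the proofs are below) =====
def Claim_equal_get_response_type_py : Prop := ∀ (emotional_tags : List String), Dom_get_response_type_py emotional_tags → Spec_get_response_type_py emotional_tags (get_response_type_py emotional_tags)

-- ===== LEMMAS AND PROOFS =====

-- ===== VERDICT (by name: the statement is the Claim_ definition above) =====
-- The fold computes exactly the disjunction (any) of each predicate, or-ed onto the initial flags.
theorem grt_foldl_flags (l : List String) (w s g : Bool) :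
    l.foldl
      (fun (acc : Bool × Bool × Bool) tag =>
        let t := PySem.Str.lower tag
        (acc.1 || PySem.Str.isIn "grief" t || PySem.Str.isIn "loss" t,
         acc.2.1 || PySem.Str.isIn "joy" t,
         acc.2.2 || PySem.Str.isIn "confusion" t))
      (w, s, g)
    = (w || l.any (fun tag => PySem.Str.isIn "grief" (PySem.Str.lower tag) || PySem.Str.isIn "loss" (PySem.Str.lower tag)),
       s || l.any (fun tag => PySem.Str.isIn "joy" (PySem.Str.lower tag)),
       g || l.any (fun tag => PySem.Str.isIn "confusion" (PySem.Str.lower tag))) := by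
  induction l generalizing w s g with
  | nil => simp
  | cons hd tl ih =>
    rw [List.foldl_cons, ih]
    simp [Bool.or_assoc]

theorem get_response_type_py_spec : Claim_equal_get_response_type_py := by
  intro tags _
  unfold Spec_get_response_type_py get_response_type_py get_response_type_py_alt
  simp only [grt_foldl_flags, Bool.false_or]
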